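-- pv_equiv track=rewrite | github.com/gasamtools/gasamTOOLS_website | apps/fi_tradingview_lightweight_charts/functions_indicators_tm.py | filter_same_mode_price
-- ===== SOURCE A (Python) =====
-- def filter_same_mode_price(modes_info):
--     # Step 1: Identify duplicates by value_start and keep the one with the larger duration
--     seen = {}
--     for i, entry in enumerate(modes_info):
--         if "value_start" in entry:
--             value_start = entry["value_start"]
--             duration = entry["time_end"] - entry["time_start"]
--
--             # If value_start already exists, compare durations
--             if value_start in seen:
--                 if duration > seen[value_start]["duration"]:
--                     # Replace the previous entry index with the current one
--                     modes_info[seen[value_start]["index"]] = None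
--                     seen[value_start] = {"index": i, "duration": duration}
--                 else:
--                     # Remove the current entry
--                     modes_info[i] = None
--             else:
--                 # Store the index and duration
--                 seen[value_start] = {"index": i, "duration": duration}
--
--     # Step 2: Remove `None` entries while keeping the rest intact
--     modes_info = [entry for entry in modes_info if entry is not None]
--
--     return modes_info
-- ===== SOURCE B (Python) =====
-- def filter_same_mode_price(modes_info):
--     # Pass 1: winner per value_start = first index achieving the maximal duration
--     # (strict '>' replacement reproduces the earliest-index tie-break).
--     best = {}
--     for i, entry in enumerate(modes_info):
--         if "value_start" in entry:
--             duration = entry["time_end"] - entry["time_start"]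
--             cur = best.get(entry["value_start"])
--             if cur is None or duration > cur[1]:
--                 best[entry["value_start"]] = (i, duration)
--     # Pass 2: keep every entry without value_start, and exactly the winner per value_start.
--     return [e for i, e in enumerate(modes_info)
--             if "value_start" not in e or best[e["value_start"]][0] == i]
-- ===== Notes on version B (the rewrite author's own statement) =====
-- stated objective: simpler
-- what changed: A incrementally overwrites losing entries with None in-place while scanning and then filters the Nones out; B first computes a winners dict (value_start -> (index, duration) of the first entry with maximal duration) in one pass and then returns a filtering comprehension keeping non-value_start entries and exactly the winner per value_start, without mutating the argument (return value only; A mutates its argument, B does not).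
import Mathlib
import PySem

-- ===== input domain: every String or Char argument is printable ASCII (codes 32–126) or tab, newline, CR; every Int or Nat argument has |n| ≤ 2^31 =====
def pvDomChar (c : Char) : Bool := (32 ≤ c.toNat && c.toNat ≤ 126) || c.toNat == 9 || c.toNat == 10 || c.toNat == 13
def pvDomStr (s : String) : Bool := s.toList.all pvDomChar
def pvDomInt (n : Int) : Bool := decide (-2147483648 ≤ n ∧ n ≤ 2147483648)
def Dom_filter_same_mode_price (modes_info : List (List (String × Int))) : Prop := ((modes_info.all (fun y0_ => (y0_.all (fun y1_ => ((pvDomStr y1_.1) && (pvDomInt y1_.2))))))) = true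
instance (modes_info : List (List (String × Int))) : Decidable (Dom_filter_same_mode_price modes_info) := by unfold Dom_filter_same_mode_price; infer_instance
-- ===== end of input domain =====

-- B keeps winners via a dict computed in a first pass and returns a filtering comprehension
-- (simpler; return value only: A overwrites losing entries of its argument with None in place, B does not mutate).

-- shared accessors: entry["value_start"] lookup and entry["time_end"] - entry["time_start"]
def pvVs (e : List (String × Int)) : Option Int := (PySem.Dict.mk e).get? "value_start"
def pvDur (e : List (String × Int)) : Int :=
  (PySem.Dict.mk e).getD "time_end" 0 - (PySem.Dict.mk e).getD "time_start" 0

-- ===== PORT A =====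
-- the Python dict {"index": i, "duration": d}
def pvRec (i d : Int) : PySem.Dict String Int := PySem.Dict.mk [("index", i), ("duration", d)]

-- loop body of A's step 1; the list component carries the (possibly None-overwritten) modes_info
def pvStepA (st : PySem.Dict Int (PySem.Dict String Int) × List (Option (List (String × Int))))
    (p : Int × List (String × Int)) :
    PySem.Dict Int (PySem.Dict String Int) × List (Option (List (String × Int))) :=
  match pvVs p.2 with
  | none => st
  | some value_start =>
    let duration := pvDur p.2
    match st.1.get? value_start with
    | some r =>
      if duration > r.getD "duration" 0 then
        (st.1.insert value_start (pvRec p.1 duration),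
         PySem.List.pySetD st.2 (r.getD "index" 0) none)
      else
        (st.1, PySem.List.pySetD st.2 p.1 none)
    | none => (st.1.insert value_start (pvRec p.1 duration), st.2)

def filter_same_mode_price (modes_info : List (List (String × Int))) : List (List (String × Int)) :=
  let st := (PySem.List.enumerate modes_info 0).foldl pvStepA (PySem.Dict.empty, modes_info.map some)
  st.2.filterMap id

-- ===== PORT B =====
-- pass 1 loop body: best[value_start] = (index, duration) of first entry with maximal duration
def pvStepB (best : PySem.Dict Int (Int × Int)) (p : Int × List (String × Int)) :
    PySem.Dict Int (Int × Int) :=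
  match pvVs p.2 with
  | none => best
  | some value_start =>
    let duration := pvDur p.2
    match best.get? value_start with
    | some cur => if duration > cur.2 then best.insert value_start (p.1, duration) else best
    | none => best.insert value_start (p.1, duration)

def filter_same_mode_price_alt (modes_info : List (List (String × Int))) : List (List (String × Int)) :=
  let best := (PySem.List.enumerate modes_info 0).foldl pvStepB PySem.Dict.empty
  -- pass 2: keep entries without value_start and exactly the winner per value_start
  -- (the key is always present in best here, so getD is exact for Python's best[...])
  (PySem.List.enumerate modes_info 0).filterMap (fun p =>
    match pvVs p.2 with
    | none => some p.2
    | some value_start => if (best.getD value_start (0, 0)).1 = p.1 then some p.2 else none)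

-- ===== PRECONDITION & SPEC =====
-- Pre_ excludes exactly the inputs where Python A raises KeyError: an entry with "value_start"
-- but missing "time_end" or "time_start".
def Pre_filter_same_mode_price (modes_info : List (List (String × Int))) : Prop :=
  ∀ e ∈ modes_info, (pvVs e).isSome →
    (PySem.Dict.mk e).contains "time_end" = true ∧ (PySem.Dict.mk e).contains "time_start" = true
instance (modes_info : List (List (String × Int))) : Decidable (Pre_filter_same_mode_price modes_info) := by
  unfold Pre_filter_same_mode_price; infer_instance

def pvWitness_filter_same_mode_price : (List (List (String × Int))) :=
  [[("value_start", 1), ("time_start", 0), ("time_end", 5)],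
   [("value_start", 1), ("time_start", 0), ("time_end", 3)],
   [("mode", 7)]]

def Spec_filter_same_mode_price (modes_info : List (List (String × Int))) (out : List (List (String × Int))) : Prop := out = filter_same_mode_price_alt modes_info
instance (modes_info : List (List (String × Int))) (out : List (List (String × Int))) : Decidable (Spec_filter_same_mode_price modes_info out) := by unfold Spec_filter_same_mode_price; infer_instance

-- ===== CLAIM (what is proved, stated in full; the proofs are below) =====
def Claim_equal_filter_same_mode_price : Prop := ∀ (modes_info : List (List (String × Int))), Dom_filter_same_mode_price modes_info → Pre_filter_same_mode_price modes_info → Spec_filter_same_mode_price modes_info (filter_same_mode_price modes_info)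

-- ===== LEMMAS AND PROOFS =====

-- keep-predicate: after processing the first n entries, position j survives iff its entry has no
-- value_start, or is not yet processed, or is the current winner for its value_start
def pvKeep (best : PySem.Dict Int (Int × Int)) (n j : Nat) (e : List (String × Int)) : Bool :=
  match pvVs e with
  | none => true
  | some vs => decide (n ≤ j) || (best.get? vs).any (fun p => decide (p.1 = (j : Int)))

-- n-free final form of pvKeep
def pvKeepF (best : PySem.Dict Int (Int × Int)) (j : Int) (e : List (String × Int)) : Bool :=
  match pvVs e with
  | none => true
  | some vs => (best.get? vs).any (fun p => decide (p.1 = j))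

def pvArrOf (orig : List (List (String × Int))) (best : PySem.Dict Int (Int × Int)) (n : Nat) :
    List (Option (List (String × Int))) :=
  orig.mapIdx (fun j e => if pvKeep best n j e then some e else none)

def pvInv (orig : List (List (String × Int))) (n : Nat)
    (seen : PySem.Dict Int (PySem.Dict String Int))
    (arr : List (Option (List (String × Int))))
    (best : PySem.Dict Int (Int × Int)) : Prop :=
  (∀ vs, seen.get? vs = (best.get? vs).map (fun p => pvRec p.1 p.2)) ∧
  (∀ vs p, best.get? vs = some p →
     0 ≤ p.1 ∧ p.1 < (n : Int) ∧ ∃ e, orig[p.1.toNat]? = some e ∧ pvVs e = some vs) ∧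
  (∀ j : Nat, ∀ hj : j < orig.length, j < n → ∀ vs,
     pvVs (orig[j]'hj) = some vs → best.contains vs = true) ∧
  arr = pvArrOf orig best n

lemma pvKeep_none {best n j e} (h : pvVs e = none) : pvKeep best n j e = true := by
  simp [pvKeep, h]

lemma pvKeep_some {best n j e vs} (h : pvVs e = some vs) :
    pvKeep best n j e = (decide (n ≤ j) || (best.get? vs).any (fun p => decide (p.1 = (j : Int)))) := by
  simp [pvKeep, h]

lemma pvKeepF_none {best j e} (h : pvVs e = none) : pvKeepF best j e = true := by
  simp [pvKeepF, h]

lemma pvKeepF_some {best j e vs} (h : pvVs e = some vs) :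
    pvKeepF best j e = (best.get? vs).any (fun p => decide (p.1 = j)) := by
  simp [pvKeepF, h]

lemma pvRec_getD_duration (i d : Int) : (pvRec i d).getD "duration" 0 = d := by
  simp [pvRec, PySem.Dict.getD_eq_get?_getD, PySem.Dict.get?_mk_cons]

lemma pvRec_getD_index (i d : Int) : (pvRec i d).getD "index" 0 = i := by
  simp [pvRec, PySem.Dict.getD_eq_get?_getD, PySem.Dict.get?_mk_cons]

lemma pvArrOf_congr (orig : List (List (String × Int)))
    (best best' : PySem.Dict Int (Int × Int)) (n n' : Nat)
    (h : ∀ j : Nat, ∀ hj : j < orig.length,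
         pvKeep best n j (orig[j]'hj) = pvKeep best' n' j (orig[j]'hj)) :
    pvArrOf orig best n = pvArrOf orig best' n' := by
  apply List.ext_getElem (by simp [pvArrOf])
  intro j h1 h2
  simp only [pvArrOf, List.getElem_mapIdx]
  rw [h j (by simpa [pvArrOf] using h1)]

lemma pvStep_inv (orig : List (List (String × Int))) (k : Nat) (hk : k < orig.length)
    (seen : PySem.Dict Int (PySem.Dict String Int))
    (arr : List (Option (List (String × Int))))
    (best : PySem.Dict Int (Int × Int))
    (h : pvInv orig k seen arr best) :
    pvInv orig (k + 1)
      (pvStepA (seen, arr) ((k : Int), orig[k])).1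
      (pvStepA (seen, arr) ((k : Int), orig[k])).2
      (pvStepB best ((k : Int), orig[k])) := by
  obtain ⟨C1, C2, C3, C4⟩ := h
  cases hvs : pvVs orig[k] with
  | none =>
    simp only [pvStepA, pvStepB, hvs]
    refine ⟨C1, ?_, ?_, ?_⟩
    · intro vs p hp
      obtain ⟨h0, h1, e, he, hv⟩ := C2 vs p hp
      exact ⟨h0, by push_cast at h1 ⊢; omega, e, he, hv⟩
    · intro j hj hjk vs hv
      rcases Nat.lt_succ_iff_lt_or_eq.mp hjk with hlt | hje
      · exact C3 j hj hlt vs hv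
      · subst hje
        exact absurd (hv.symm.trans hvs) (by simp)
    · rw [C4]
      apply pvArrOf_congr
      intro j hj
      cases hv : pvVs (orig[j]'hj) with
      | none => rw [pvKeep_none hv, pvKeep_none hv]
      | some vs' =>
        rw [pvKeep_some hv, pvKeep_some hv]
        congr 1
        simp only [decide_eq_decide]
        by_cases hjk : j = k
        · subst hjk; exact absurd (hv.symm.trans hvs) (by simp)
        · omega
  | some vs =>
    have hseen := C1 vs
    cases hb : best.get? vs with
    | none =>
      rw [hb, Option.map_none] at hseen
      simp only [pvStepA, pvStepB, hvs, hseen, hb]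
      refine ⟨?_, ?_, ?_, ?_⟩
      · intro vs'
        by_cases hv' : vs' = vs
        · subst hv'
          rw [PySem.Dict.get?_insert_self, PySem.Dict.get?_insert_self, Option.map_some]
        · rw [PySem.Dict.get?_insert, if_neg hv', PySem.Dict.get?_insert, if_neg hv']
          exact C1 vs'
      · intro vs' p hp
        by_cases hv' : vs' = vs
        · subst hv'
          rw [PySem.Dict.get?_insert_self] at hp
          obtain rfl := (Option.some.inj hp).symm
          refine ⟨Int.natCast_nonneg k, by push_cast; omega, orig[k], ?_, hvs⟩
          simp only [Int.toNat_natCast]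
          exact List.getElem?_eq_getElem hk
        · rw [PySem.Dict.get?_insert, if_neg hv'] at hp
          obtain ⟨h0, h1, e, he, hv⟩ := C2 vs' p hp
          exact ⟨h0, by push_cast at h1 ⊢; omega, e, he, hv⟩
      · intro j hj hjk vs' hv
        rw [PySem.Dict.contains_insert]
        rcases Nat.lt_succ_iff_lt_or_eq.mp hjk with hlt | hje
        · have := C3 j hj hlt vs' hv
          simp [this]
        · subst hje
          have hveq : vs' = vs := Option.some.inj (hv.symm.trans hvs)
          simp [hveq]
      · rw [C4]
        apply pvArrOf_congr
        intro j hj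
        cases hv : pvVs (orig[j]'hj) with
        | none => rw [pvKeep_none hv, pvKeep_none hv]
        | some vs' =>
          by_cases hv' : vs' = vs
          · subst hv'
            rw [pvKeep_some hv, pvKeep_some hv, hb, PySem.Dict.get?_insert_self]
            simp only [Option.any_none, Option.any_some, Bool.or_false]
            rcases lt_trichotomy j k with hlt | hje | hgt
            · exfalso
              have hc := C3 j hj hlt _ hv
              rw [PySem.Dict.contains_eq_isSome_get?, hb] at hc
              simp at hc
            · subst hje
              simp
            · rw [← Bool.decide_or]
              simp only [decide_eq_decide]
              constructor <;> (intro; omega)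
          · rw [pvKeep_some hv, pvKeep_some hv, PySem.Dict.get?_insert, if_neg hv']
            have hjk : j ≠ k := by
              intro hje; subst hje
              exact hv' (Option.some.inj (hv.symm.trans hvs))
            congr 1
            simp only [decide_eq_decide]
            omega
    | some c =>
      rw [hb, Option.map_some] at hseen
      obtain ⟨hc0, hck, ec, hec, hecv⟩ := C2 vs c hb
      obtain ⟨hclen, hecq⟩ := List.getElem?_eq_some_iff.mp hec
      simp only [pvStepA, pvStepB, hvs, hseen, hb, pvRec_getD_duration, pvRec_getD_index]
      by_cases hdur : pvDur orig[k] > c.2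
      · simp only [if_pos hdur]
        refine ⟨?_, ?_, ?_, ?_⟩
        · intro vs'
          by_cases hv' : vs' = vs
          · subst hv'
            rw [PySem.Dict.get?_insert_self, PySem.Dict.get?_insert_self, Option.map_some]
          · rw [PySem.Dict.get?_insert, if_neg hv', PySem.Dict.get?_insert, if_neg hv']
            exact C1 vs'
        · intro vs' p hp
          by_cases hv' : vs' = vs
          · subst hv'
            rw [PySem.Dict.get?_insert_self] at hp
            obtain rfl := (Option.some.inj hp).symm
            refine ⟨Int.natCast_nonneg k, by push_cast; omega, orig[k], ?_, hvs⟩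
            simp only [Int.toNat_natCast]
            exact List.getElem?_eq_getElem hk
          · rw [PySem.Dict.get?_insert, if_neg hv'] at hp
            obtain ⟨h0, h1, e, he, hv⟩ := C2 vs' p hp
            exact ⟨h0, by push_cast at h1 ⊢; omega, e, he, hv⟩
        · intro j hj hjk vs' hv
          rw [PySem.Dict.contains_insert]
          rcases Nat.lt_succ_iff_lt_or_eq.mp hjk with hlt | hje
          · have := C3 j hj hlt vs' hv
            simp [this]
          · subst hje
            have hveq : vs' = vs := Option.some.inj (hv.symm.trans hvs)
            simp [hveq]
        · rw [C4, PySem.List.pySetD_of_nonneg _ _ hc0]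
          apply List.ext_getElem (by simp [pvArrOf])
          intro j h1 h2
          have hjlen : j < orig.length := by simpa [pvArrOf] using h2
          rw [List.getElem_set]
          simp only [pvArrOf, List.getElem_mapIdx]
          by_cases hcj : c.1.toNat = j
          · rw [if_pos hcj]
            subst hcj
            have hv : pvVs (orig[c.1.toNat]'hjlen) = some vs := by rw [hecq]; exact hecv
            rw [pvKeep_some hv, PySem.Dict.get?_insert_self]
            simp only [Option.any_some]
            simp
            omega
          · rw [if_neg hcj]
            have hkeq : pvKeep best k j (orig[j]'hjlen)
                = pvKeep (best.insert vs ((k : Int), pvDur orig[k])) (k + 1) j (orig[j]'hjlen) := by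
              cases hv : pvVs (orig[j]'hjlen) with
              | none => rw [pvKeep_none hv, pvKeep_none hv]
              | some vs' =>
                by_cases hv' : vs' = vs
                · subst hv'
                  rw [pvKeep_some hv, pvKeep_some hv, hb, PySem.Dict.get?_insert_self]
                  simp only [Option.any_some]
                  rw [← Bool.decide_or, ← Bool.decide_or]
                  simp only [decide_eq_decide]
                  constructor <;> (intro hh; rcases hh with hh | hh) <;> omega
                · rw [pvKeep_some hv, pvKeep_some hv, PySem.Dict.get?_insert, if_neg hv']
                  have hjk : j ≠ k := by
                    intro hje; subst hje
                    exact hv' (Option.some.inj (hv.symm.trans hvs))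
                  congr 1
                  simp only [decide_eq_decide]
                  omega
            rw [hkeq]
      · simp only [if_neg hdur]
        refine ⟨C1, ?_, ?_, ?_⟩
        · intro vs' p hp
          obtain ⟨h0, h1, e, he, hv⟩ := C2 vs' p hp
          exact ⟨h0, by push_cast at h1 ⊢; omega, e, he, hv⟩
        · intro j hj hjk vs' hv
          rcases Nat.lt_succ_iff_lt_or_eq.mp hjk with hlt | hje
          · exact C3 j hj hlt vs' hv
          · subst hje
            have hveq : vs' = vs := Option.some.inj (hv.symm.trans hvs)
            subst hveq
            rw [PySem.Dict.contains_eq_isSome_get?, hb]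
            rfl
        · rw [C4, PySem.List.pySetD_natCast]
          apply List.ext_getElem (by simp [pvArrOf])
          intro j h1 h2
          have hjlen : j < orig.length := by simpa [pvArrOf] using h2
          rw [List.getElem_set]
          simp only [pvArrOf, List.getElem_mapIdx]
          by_cases hkj : k = j
          · rw [if_pos hkj]
            subst hkj
            rw [pvKeep_some hvs, hb]
            simp only [Option.any_some]
            simp
            omega
          · rw [if_neg hkj]
            have hkeq : pvKeep best k j (orig[j]'hjlen) = pvKeep best (k + 1) j (orig[j]'hjlen) := by
              cases hv : pvVs (orig[j]'hjlen) with
              | none => rw [pvKeep_none hv, pvKeep_none hv]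
              | some vs' =>
                rw [pvKeep_some hv, pvKeep_some hv]
                congr 1
                simp only [decide_eq_decide]
                omega
            rw [hkeq]

lemma pvMainAux (orig : List (List (String × Int))) : ∀ (fuel k : Nat), orig.length - k ≤ fuel →
    ∀ (seen : PySem.Dict Int (PySem.Dict String Int))
      (arr : List (Option (List (String × Int))))
      (best : PySem.Dict Int (Int × Int)),
    pvInv orig k seen arr best →
    pvInv orig orig.length
      ((PySem.List.enumerate (orig.drop k) k).foldl pvStepA (seen, arr)).1
      ((PySem.List.enumerate (orig.drop k) k).foldl pvStepA (seen, arr)).2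
      ((PySem.List.enumerate (orig.drop k) k).foldl pvStepB best) := by
  intro fuel
  induction fuel with
  | zero =>
    intro k hf seen arr best h
    have hlen : orig.length ≤ k := by omega
    have hdrop : orig.drop k = [] := by simp [List.drop_eq_nil_iff]; omega
    rw [hdrop, PySem.List.enumerate_nil]
    simp only [List.foldl_nil]
    obtain ⟨C1, C2, C3, C4⟩ := h
    refine ⟨C1, ?_, ?_, ?_⟩
    · intro vs p hp
      obtain ⟨h0, h1, e, he, hv⟩ := C2 vs p hp
      have : p.1.toNat < orig.length := (List.getElem?_eq_some_iff.mp he).1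
      exact ⟨h0, by omega, e, he, hv⟩
    · intro j hj _ vs hv
      exact C3 j hj (by omega) vs hv
    · rw [C4]
      apply pvArrOf_congr
      intro j hj
      cases hv : pvVs (orig[j]'hj) with
      | none => rw [pvKeep_none hv, pvKeep_none hv]
      | some vs =>
        rw [pvKeep_some hv, pvKeep_some hv]
        congr 1
        simp only [decide_eq_decide]
        omega
  | succ fuel ih =>
    intro k hf seen arr best h
    by_cases hk : k < orig.length
    · have hdrop : orig.drop k = orig[k] :: orig.drop (k + 1) := List.drop_eq_getElem_cons hk
      rw [hdrop, PySem.List.enumerate_cons, List.foldl_cons, List.foldl_cons]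
      have hcast : (k : Int) + 1 = ((k + 1 : Nat) : Int) := by push_cast; ring
      rw [hcast]
      exact ih (k + 1) (by omega) _ _ _ (pvStep_inv orig k hk seen arr best h)
    · have hdrop : orig.drop k = [] := by simp [List.drop_eq_nil_iff]; omega
      rw [hdrop, PySem.List.enumerate_nil]
      simp only [List.foldl_nil]
      obtain ⟨C1, C2, C3, C4⟩ := h
      refine ⟨C1, ?_, ?_, ?_⟩
      · intro vs p hp
        obtain ⟨h0, h1, e, he, hv⟩ := C2 vs p hp
        have : p.1.toNat < orig.length := (List.getElem?_eq_some_iff.mp he).1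
        exact ⟨h0, by omega, e, he, hv⟩
      · intro j hj _ vs hv
        exact C3 j hj (by omega) vs hv
      · rw [C4]
        apply pvArrOf_congr
        intro j hj
        cases hv : pvVs (orig[j]'hj) with
        | none => rw [pvKeep_none hv, pvKeep_none hv]
        | some vs =>
          rw [pvKeep_some hv, pvKeep_some hv]
          congr 1
          simp only [decide_eq_decide]
          omega

lemma pvMain (orig : List (List (String × Int))) (k : Nat)
    (seen : PySem.Dict Int (PySem.Dict String Int))
    (arr : List (Option (List (String × Int))))
    (best : PySem.Dict Int (Int × Int))
    (h : pvInv orig k seen arr best) :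
    pvInv orig orig.length
      ((PySem.List.enumerate (orig.drop k) k).foldl pvStepA (seen, arr)).1
      ((PySem.List.enumerate (orig.drop k) k).foldl pvStepA (seen, arr)).2
      ((PySem.List.enumerate (orig.drop k) k).foldl pvStepB best) :=
  pvMainAux orig (orig.length - k) k (by omega) seen arr best h

lemma pvMapIdx_enum {β : Type} (xs : List (List (String × Int))) : ∀ (s : Int) (f : Int → List (String × Int) → β),
    xs.mapIdx (fun j e => f (s + (j : Int)) e) = (PySem.List.enumerate xs s).map (fun p => f p.1 p.2) := by
  induction xs with
  | nil => intro s f; simp [PySem.List.enumerate_nil]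
  | cons x xs ih =>
    intro s f
    rw [PySem.List.enumerate_cons, List.map_cons, List.mapIdx_cons]
    congr 1
    · norm_num
    · have hfun : (fun (i : Nat) => (fun (j : Nat) (e : List (String × Int)) => f (s + (j : Int)) e) (i + 1))
          = (fun (i : Nat) (e : List (String × Int)) => f ((s + 1) + (i : Int)) e) := by
        funext i e
        show f (s + ((i + 1 : Nat) : Int)) e = _
        congr 1
        push_cast
        ring
      rw [hfun, ih (s + 1) f]

lemma pvBridge (best : PySem.Dict Int (Int × Int)) (xs : List (List (String × Int))) (s : Int)
    (h : ∀ e ∈ xs, ∀ vs, pvVs e = some vs → best.contains vs = true) :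
    (PySem.List.enumerate xs s).filterMap (fun p => if pvKeepF best p.1 p.2 then some p.2 else none)
    = (PySem.List.enumerate xs s).filterMap (fun p =>
        match pvVs p.2 with
        | none => some p.2
        | some value_start => if (best.getD value_start (0, 0)).1 = p.1 then some p.2 else none) := by
  apply List.filterMap_congr
  intro p hp
  have hmem : p.2 ∈ xs := by
    have := List.mem_map_of_mem (f := fun q : Int × List (String × Int) => q.2) hp
    rwa [PySem.List.map_snd_enumerate] at this
  cases hvs : pvVs p.2 with
  | none => rw [pvKeepF_none hvs]; simp
  | some vs =>
    have hc := h p.2 hmem vs hvs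
    rw [PySem.Dict.contains_eq_isSome_get?] at hc
    cases hg : best.get? vs with
    | none => rw [hg] at hc; simp at hc
    | some q =>
      rw [pvKeepF_some hvs, hg]
      show _ = if (best.getD vs (0, 0)).1 = p.1 then some p.2 else none
      have hd : best.getD vs (0, 0) = q := PySem.Dict.getD_of_get?_eq_some best (0, 0) hg
      rw [hd]
      by_cases hq : q.1 = p.1
      · simp [hq]
      · simp [hq]

-- ===== VERDICT (by name: the statement is the Claim_ definition above) =====
theorem filter_same_mode_price_spec : Claim_equal_filter_same_mode_price := by
  intro mi _hdom _hpre
  unfold Spec_filter_same_mode_price filter_same_mode_price filter_same_mode_price_alt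
  dsimp only
  have h0 : pvInv mi 0 PySem.Dict.empty (mi.map some) PySem.Dict.empty := by
    refine ⟨?_, ?_, ?_, ?_⟩
    · intro vs; simp [PySem.Dict.get?_empty]
    · intro vs p hp; simp [PySem.Dict.get?_empty] at hp
    · intro j hj hj0 vs hv; omega
    · apply List.ext_getElem (by simp [pvArrOf])
      intro j h1 h2
      simp only [pvArrOf, List.getElem_mapIdx, List.getElem_map]
      cases hv : pvVs (mi[j]'(by simpa using h1)) with
      | none => rw [pvKeep_none hv]; simp
      | some vs => rw [pvKeep_some hv]; simp
  have hm := pvMain mi 0 PySem.Dict.empty (mi.map some) PySem.Dict.empty h0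
  rw [List.drop_zero, Nat.cast_zero] at hm
  obtain ⟨C1, C2, C3, C4⟩ := hm
  rw [C4]
  have harr : pvArrOf mi ((PySem.List.enumerate mi 0).foldl pvStepB PySem.Dict.empty) mi.length
      = mi.mapIdx (fun j e =>
          if pvKeepF ((PySem.List.enumerate mi 0).foldl pvStepB PySem.Dict.empty) ((0 : Int) + (j : Int)) e
          then some e else none) := by
    apply List.ext_getElem (by simp [pvArrOf])
    intro j h1 h2
    simp only [pvArrOf, List.getElem_mapIdx]
    have hjlen : j < mi.length := by simpa [pvArrOf] using h1
    cases hv : pvVs (mi[j]'hjlen) with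
    | none => rw [pvKeep_none hv, pvKeepF_none hv]
    | some vs =>
      rw [pvKeep_some hv, pvKeepF_some hv]
      simp [show ¬ (mi.length ≤ j) by omega]
  rw [harr,
    pvMapIdx_enum mi 0 (fun t e =>
      if pvKeepF ((PySem.List.enumerate mi 0).foldl pvStepB PySem.Dict.empty) t e then some e else none),
    List.filterMap_map]
  have hcomp : (id ∘ fun p : Int × List (String × Int) =>
      if pvKeepF ((PySem.List.enumerate mi 0).foldl pvStepB PySem.Dict.empty) p.1 p.2
      then some p.2 else none)
      = (fun p : Int × List (String × Int) =>
      if pvKeepF ((PySem.List.enumerate mi 0).foldl pvStepB PySem.Dict.empty) p.1 p.2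
      then some p.2 else none) := rfl
  rw [hcomp]
  apply pvBridge
  intro e he vs hv
  obtain ⟨j, hj, rfl⟩ := List.getElem_of_mem he
  exact C3 j hj hj vs hv
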